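-- pv_equiv track=rewrite | github.com/arthuryuan/TestNG-- | gh.py | seperate
-- ===== SOURCE A (Python) =====
-- def seperate(name):
--   if len(name) == 0:
--     return []
--
--   word = [name[0]]
--
--   for i in range(1, len(name)):
--     if not name[i].isupper():
--        word += name[i]
--     else:
--        return [word] + seperate(name[i:])
--
--   return [word]
-- ===== SOURCE B (Python) =====
-- def seperate(name):
--     if not name:
--         return []
--     out = []
--     word = [name[0]]
--     for ch in name[1:]:
--         if ch.isupper():
--             out.append(word)
--             word = [ch]
--         else:
--             word.append(ch)
--     out.append(word)
--     return out
-- ===== Notes on version B (the rewrite author's own statement) =====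
-- stated objective: faster
-- what changed: Replaced A's recursion-on-suffix with early return and repeated list/slice copying by a single iterative left-to-right pass maintaining an output accumulator and the current word.
import Mathlib
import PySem

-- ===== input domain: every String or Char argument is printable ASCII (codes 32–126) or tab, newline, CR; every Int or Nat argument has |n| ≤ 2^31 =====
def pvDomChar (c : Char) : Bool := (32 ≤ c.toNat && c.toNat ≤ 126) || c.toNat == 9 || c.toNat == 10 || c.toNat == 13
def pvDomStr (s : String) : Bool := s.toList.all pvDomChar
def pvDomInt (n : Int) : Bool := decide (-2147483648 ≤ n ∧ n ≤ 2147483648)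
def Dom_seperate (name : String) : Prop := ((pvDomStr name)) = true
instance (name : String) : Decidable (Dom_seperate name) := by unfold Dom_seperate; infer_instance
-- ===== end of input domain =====

-- B replaces A's recursion on the uppercase suffix (with its repeated copying) by one
-- iterative pass with an output accumulator and the current word; return value unchanged.

-- ===== PORT A =====
-- A, literally: empty → []; word starts as [name[0]]; scan i = 1.. — a non-uppercase
-- char is appended to word, an uppercase char triggers 'return [word] + seperate(name[i:])';
-- if the loop finishes, return [word].  The for-loop with early return is sepLoopA, the
-- top-level call (empty test + word initialisation) is sepGoA, mutually recursive exactly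
-- as A's loop and recursive call are.
mutual
def sepGoA : List Char → List (List String)
  | [] => []
  | c :: rest => sepLoopA rest [String.ofList [c]]
  termination_by cs => (cs.length, 0)
def sepLoopA : List Char → List String → List (List String)
  | [], word => [word]
  | d :: rest', word =>
    if ¬ PySem.Chars.isupper d then sepLoopA rest' (word ++ [String.ofList [d]])
    else [word] ++ sepGoA (d :: rest')
  termination_by cs _ => (cs.length, 1)
end

def seperate (name : String) : List (List String) := sepGoA name.toList

-- ===== PORT B =====
-- B, literally: state (out, word); each further character either flushes word and starts
-- a new one (uppercase) or is appended to word; word is flushed once more at the end.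
def sepStepB (st : List (List String) × List String) (ch : Char) :
    List (List String) × List String :=
  if PySem.Chars.isupper ch then (st.1 ++ [st.2], [String.ofList [ch]])
  else (st.1, st.2 ++ [String.ofList [ch]])

def seperate_alt (name : String) : List (List String) :=
  match name.toList with
  | [] => []
  | c :: rest =>
    let st := rest.foldl sepStepB ([], [String.ofList [c]])
    st.1 ++ [st.2]

-- ===== PRECONDITION & SPEC =====
def Spec_seperate (name : String) (out : List (List String)) : Prop := out = seperate_alt name
instance (name : String) (out : List (List String)) : Decidable (Spec_seperate name out) := by unfold Spec_seperate; infer_instance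

-- ===== CLAIM (what is proved, stated in full; the proofs are below) =====
def Claim_equal_seperate : Prop := ∀ (name : String), Dom_seperate name → Spec_seperate name (seperate name)

-- ===== LEMMAS AND PROOFS =====
-- Invariant of B's fold: flushing after folding over rest from state (out, word)
-- yields out followed by exactly what A's loop produces from rest and word.
lemma sepFold_eq_loopA (rest : List Char) :
    ∀ (out : List (List String)) (word : List String),
      (rest.foldl sepStepB (out, word)).1 ++ [(rest.foldl sepStepB (out, word)).2]
        = out ++ sepLoopA rest word := by
  induction rest with
  | nil => intro out word; simp [sepLoopA]
  | cons d rest' ih =>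
    intro out word
    by_cases h : PySem.Chars.isupper d
    · rw [List.foldl_cons]
      simp only [sepStepB, h, if_pos, ih]
      rw [sepLoopA, sepGoA]
      simp [h]
    · rw [List.foldl_cons]
      simp only [sepStepB, h, ih]
      rw [sepLoopA]
      simp [h]

-- ===== VERDICT (by name: the statement is the Claim_ definition above) =====
theorem seperate_spec : Claim_equal_seperate := by
  intro name _
  unfold Spec_seperate seperate seperate_alt
  cases h : name.toList with
  | nil => simp [sepGoA]
  | cons c rest =>
    rw [sepGoA]
    simpa using (sepFold_eq_loopA rest [] [String.ofList [c]]).symm
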